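-- pv_equiv track=rewrite | github.com/chrislit/abydos | abydos/fingerprint/_lightweight.py | position_fingerprint
-- ===== SOURCE A (Python) =====
-- MOST_COMMON_LETTERS_CG = ('e', 't', 'a', 'o', 'i', 'n', 's', 'h', 'r', 'd',
--                           'l', 'c', 'u', 'm', 'w', 'f')
--
-- def position_fingerprint(
--     word, n_bits=16, most_common=MOST_COMMON_LETTERS_CG, bits_per_letter=3
-- ):
--     """Return the position fingerprint.
--
--     Based on the position fingerprint from :cite:`Cislak:2017`.
--
--     :param str word: the word to fingerprint
--     :param int n_bits: number of bits in the fingerprint returned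
--     :param list most_common: the most common tokens in the target language,
--         ordered by frequency
--     :param int bits_per_letter: the bits to assign for letter position
--     :returns: the position fingerprint
--     :rtype: int
--
--     >>> bin(position_fingerprint('hat'))
--     '0b1110100011111111'
--     >>> bin(position_fingerprint('niall'))
--     '0b1111110101110010'
--     >>> bin(position_fingerprint('colin'))
--     '0b1111111110010111'
--     >>> bin(position_fingerprint('atcg'))
--     '0b1110010001111111'
--     >>> bin(position_fingerprint('entreatment'))
--     '0b101011111111'
--     """
--     position = {}
--     for pos, letter in enumerate(word):
--         if letter not in position and letter in most_common:
--             position[letter] = min(pos, 2 ** bits_per_letter - 1)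
--
--     fingerprint = 0
--
--     for letter in most_common:
--         if n_bits:
--             fingerprint <<= min(bits_per_letter, n_bits)
--             if letter in position:
--                 fingerprint += min(position[letter], 2 ** n_bits - 1)
--             else:
--                 fingerprint += min(2 ** bits_per_letter - 1, 2 ** n_bits - 1)
--             n_bits -= min(bits_per_letter, n_bits)
--         else:
--             break
--
--     for _ in range(n_bits):
--         fingerprint <<= 1
--         fingerprint += 1
--
--     return fingerprint
-- ===== SOURCE B (Python) =====
-- MOST_COMMON_LETTERS_CG = ('e', 't', 'a', 'o', 'i', 'n', 's', 'h', 'r', 'd',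
--                           'l', 'c', 'u', 'm', 'w', 'f')
--
--
-- def position_fingerprint(
--     word, n_bits=16, most_common=MOST_COMMON_LETTERS_CG, bits_per_letter=3
-- ):
--     """Assemble the fingerprint as a binary string, then evaluate it once."""
--     position = {}
--     for pos, letter in enumerate(word):
--         if letter not in position and letter in most_common:
--             position[letter] = min(pos, 2 ** bits_per_letter - 1)
--
--     fields = []
--     remaining = n_bits
--     for letter in most_common:
--         if remaining <= 0:
--             break
--         width = min(bits_per_letter, remaining)
--         if letter in position:
--             value = min(position[letter], 2 ** remaining - 1)
--         else:
--             value = min(2 ** bits_per_letter - 1, 2 ** remaining - 1)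
--         fields.append(''.join(
--             '1' if (value >> k) & 1 else '0' for k in reversed(range(width))
--         ))
--         remaining -= width
--
--     fields.append('1' * remaining)
--
--     fingerprint = 0
--     for bit in ''.join(fields):
--         fingerprint = fingerprint * 2 + (1 if bit == '1' else 0)
--     return fingerprint
-- ===== Notes on version B (the rewrite author's own statement) =====
-- stated objective: alternative
-- what changed: B keeps the first-occurrence pass but assembles the fingerprint as a binary bit string (fixed-width fields rendered by per-bit extraction, then the trailing ones appended at once) and evaluates the whole string with a single Horner-rule loop, instead of A's interleaved shift-and-add accumulation with an in-loop break counter and a bit-by-bit tail loop.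
import Mathlib
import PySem

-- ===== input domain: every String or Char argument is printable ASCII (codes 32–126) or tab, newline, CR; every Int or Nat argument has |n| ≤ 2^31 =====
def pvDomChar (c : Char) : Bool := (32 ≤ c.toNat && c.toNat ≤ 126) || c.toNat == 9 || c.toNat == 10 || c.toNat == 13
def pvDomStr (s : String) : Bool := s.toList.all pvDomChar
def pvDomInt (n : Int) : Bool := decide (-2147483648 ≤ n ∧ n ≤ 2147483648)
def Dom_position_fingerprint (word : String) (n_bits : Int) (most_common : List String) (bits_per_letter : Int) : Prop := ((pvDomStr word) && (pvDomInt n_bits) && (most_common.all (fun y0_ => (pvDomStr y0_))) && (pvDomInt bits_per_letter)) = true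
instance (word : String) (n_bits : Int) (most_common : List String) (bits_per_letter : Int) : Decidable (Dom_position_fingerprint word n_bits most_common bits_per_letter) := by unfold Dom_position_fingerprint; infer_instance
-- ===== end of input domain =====

-- B builds the fingerprint as a binary bit string (fixed-width fields + trailing ones) evaluated once
-- by Horner's rule, instead of A's interleaved shift-and-add loop with a bit-by-bit tail; objective: alternative.

-- ===== PORT A =====

-- First pass, shared verbatim by both Pythons: first occurrence (capped at 2**bits_per_letter-1)
-- of each letter of `word` that occurs in `most_common`.  `2 ** bits_per_letter` is ported with
-- `.toNat` on the exponent: for bits_per_letter < 0 Python produces a float there, which is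
-- excluded by Pre_ whenever this value can reach the result.
def pfPosition (word : String) (most_common : List String) (bits_per_letter : Int) : PySem.Dict String Int :=
  (PySem.List.enumerate word.toList).foldl
    (fun position pl =>
      let letter := String.ofList [pl.2]
      if !position.contains letter && most_common.contains letter then
        position.insert letter (min pl.1 (2 ^ bits_per_letter.toNat - 1))
      else position)
    PySem.Dict.empty

-- Shifts and `2 ** n_bits` are ported with `.toNat`: Python raises on a negative shift count and
-- yields a float for a negative exponent; Pre_ excludes exactly the inputs where A reaches those.
def position_fingerprint (word : String) (n_bits : Int) (most_common : List String) (bits_per_letter : Int) : Int :=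
  let position := pfPosition word most_common bits_per_letter
  -- `for letter in most_common: if n_bits: … else: break` — fold with a break flag
  let st := most_common.foldl
    (fun st letter =>
      if st.2.2 then st
      else if st.2.1 ≠ 0 then
        let fp := st.1 <<< (min bits_per_letter st.2.1).toNat
        let fp := match position.get? letter with
          | some v => fp + min v (2 ^ st.2.1.toNat - 1)
          | none   => fp + min ((2 : Int) ^ bits_per_letter.toNat - 1) (2 ^ st.2.1.toNat - 1)
        (fp, st.2.1 - min bits_per_letter st.2.1, false)
      else (st.1, st.2.1, true))
    ((0 : Int), n_bits, false)
  -- `for _ in range(n_bits): fingerprint <<= 1; fingerprint += 1`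
  (PySem.List.pyRange 0 st.2.1 1).foldl (fun fingerprint _ => fingerprint * 2 + 1) st.1

-- ===== PORT B =====

-- `''.join('1' if (value >> k) & 1 else '0' for k in reversed(range(width)))`
-- (`(value >> k) & 1` is truthy iff nonzero; k ≥ 0 always, from range(width))
def pfField (value : Int) (width : Int) : List Char :=
  ((PySem.List.pyRange 0 width 1).reverse).map
    (fun k => if PySem.Int.band (value >>> k.toNat) 1 ≠ 0 then '1' else '0')

def position_fingerprint_alt (word : String) (n_bits : Int) (most_common : List String) (bits_per_letter : Int) : Int :=
  let position := pfPosition word most_common bits_per_letter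
  -- collect the fixed-width fields (fold with a break flag)
  let st := most_common.foldl
    (fun st letter =>
      if st.2.2 then st
      else if st.2.1 ≤ 0 then (st.1, st.2.1, true)
      else
        let width := min bits_per_letter st.2.1
        let value := match position.get? letter with
          | some v => min v (2 ^ st.2.1.toNat - 1)
          | none   => min ((2 : Int) ^ bits_per_letter.toNat - 1) (2 ^ st.2.1.toNat - 1)
        (st.1 ++ [pfField value width], st.2.1 - width, false))
    (([] : List (List Char)), n_bits, false)
  -- `fields.append('1' * remaining)` ('1' * r is empty for r ≤ 0, hence `.toNat`)
  let fields := st.1 ++ [List.replicate st.2.1.toNat '1']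
  -- `for bit in ''.join(fields): fingerprint = fingerprint * 2 + (1 if bit == '1' else 0)`
  fields.flatten.foldl (fun fingerprint bit => fingerprint * 2 + (if bit == '1' then 1 else 0)) 0

-- ===== PRECONDITION & SPEC =====

-- Pre_ excludes exactly the inputs on which A does not return an int: for n_bits < 0 with a
-- nonempty most_common A raises ValueError (negative shift count), and for bits_per_letter < 0
-- with n_bits > 0 and a nonempty most_common A returns a float (2 ** bits_per_letter).
def Pre_position_fingerprint (word : String) (n_bits : Int) (most_common : List String) (bits_per_letter : Int) : Prop :=
  most_common = [] ∨ n_bits = 0 ∨ (0 < n_bits ∧ 0 ≤ bits_per_letter)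
instance (word : String) (n_bits : Int) (most_common : List String) (bits_per_letter : Int) : Decidable (Pre_position_fingerprint word n_bits most_common bits_per_letter) := by unfold Pre_position_fingerprint; infer_instance

def pvWitness_position_fingerprint : String × Int × List String × Int :=
  ("hat", 16, ["e", "t", "a", "o", "i", "n", "s", "h", "r", "d", "l", "c", "u", "m", "w", "f"], 3)

def Spec_position_fingerprint (word : String) (n_bits : Int) (most_common : List String) (bits_per_letter : Int) (out : Int) : Prop := out = position_fingerprint_alt word n_bits most_common bits_per_letter
instance (word : String) (n_bits : Int) (most_common : List String) (bits_per_letter : Int) (out : Int) : Decidable (Spec_position_fingerprint word n_bits most_common bits_per_letter out) := by unfold Spec_position_fingerprint; infer_instance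

-- ===== CLAIM (what is proved, stated in full; the proofs are below) =====
def Claim_equal_position_fingerprint : Prop := ∀ (word : String) (n_bits : Int) (most_common : List String) (bits_per_letter : Int), Dom_position_fingerprint word n_bits most_common bits_per_letter → Pre_position_fingerprint word n_bits most_common bits_per_letter → Spec_position_fingerprint word n_bits most_common bits_per_letter (position_fingerprint word n_bits most_common bits_per_letter)


-- ===== LEMMAS AND PROOFS =====

-- B's final Horner loop, as a function of the bit string.
def pfVal (cs : List Char) : Int :=
  cs.foldl (fun fingerprint bit => fingerprint * 2 + (if bit == '1' then 1 else 0)) 0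

theorem pfVal_aux (cs : List Char) (a : Int) :
    cs.foldl (fun f bit => f * 2 + (if bit == '1' then 1 else 0)) a = a * 2 ^ cs.length + pfVal cs := by
  induction cs generalizing a with
  | nil => simp [pfVal]
  | cons c cs ih =>
    simp only [List.foldl_cons, List.length_cons, pfVal]
    rw [ih, ih ((0:Int) * 2 + _)]
    ring

theorem pfVal_append (s t : List Char) : pfVal (s ++ t) = pfVal s * 2 ^ t.length + pfVal t := by
  simp only [pfVal, List.foldl_append]
  rw [pfVal_aux]
  rfl

theorem pfVal_ones (r : Nat) : pfVal (List.replicate r '1') = 2 ^ r - 1 := by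
  induction r with
  | zero => simp [pfVal]
  | succ n ih =>
    rw [List.replicate_succ]
    show pfVal ('1' :: List.replicate n '1') = _
    simp only [pfVal, List.foldl_cons]
    rw [pfVal_aux]
    simp only [List.length_replicate]
    rw [ih]
    norm_num
    ring

theorem pfField_eq (v w : Int) :
    pfField v w = (List.range w.toNat).reverse.map
      (fun k : Nat => if PySem.Int.band (v >>> k) 1 ≠ 0 then '1' else '0') := by
  have h0 : w - 0 = w := by ring
  rw [pfField, PySem.List.pyRange_one, h0, ← List.map_reverse, List.map_map]
  refine List.map_congr_left ?_
  intro k _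
  simp [Int.shiftRight_natCast_right]

theorem pfField_length (v w : Int) : (pfField v w).length = w.toNat := by
  simp [pfField_eq]

theorem pfBitsNat (w n : Nat) :
    pfVal ((List.range w).reverse.map (fun k => if (n >>> k) % 2 = 1 then '1' else '0')) = ((n % 2 ^ w : Nat) : Int) := by
  induction w with
  | zero => simp [pfVal]
  | succ w ih =>
    rw [List.range_succ, List.reverse_append]
    simp only [List.reverse_cons, List.reverse_nil, List.nil_append, List.cons_append,
      List.map_cons]
    show pfVal (_ :: _) = _
    simp only [pfVal, List.foldl_cons]
    rw [pfVal_aux]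
    rw [ih]
    simp only [List.length_map, List.length_reverse, List.length_range]
    rw [Nat.shiftRight_eq_div_pow, pow_succ, Nat.mod_mul]
    rcases Nat.mod_two_eq_zero_or_one (n / 2 ^ w) with h | h <;>
      simp [h] <;> ring_nf

theorem pfVal_pfField (v w : Int) (hv : 0 ≤ v) (hw : v < 2 ^ w.toNat) : pfVal (pfField v w) = v := by
  rw [pfField_eq]
  obtain ⟨n, rfl⟩ : ∃ n : Nat, v = (n : Int) := ⟨v.toNat, by omega⟩
  have hcond : ∀ k : Nat, (PySem.Int.band ((n : Int) >>> k) 1 ≠ 0) ↔ ((n >>> k) % 2 = 1) := by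
    intro k
    rw [show ((n : Int) >>> k) = ((n >>> k : Nat) : Int) from rfl]
    rw [show ((1:Int)) = ((1:Nat):Int) from rfl, PySem.Int.band_natCast]
    rw [Nat.and_one_is_mod]
    omega
  have hfun : (fun k : Nat => if PySem.Int.band ((n:Int) >>> k) 1 ≠ 0 then '1' else '0')
       = (fun k : Nat => if (n >>> k) % 2 = 1 then '1' else '0') := by
    funext k; rw [if_congr (by rw [hcond k]) rfl rfl]
  rw [hfun, pfBitsNat]
  have hn : n < 2 ^ w.toNat := by exact_mod_cast hw
  rw [Nat.mod_eq_of_lt hn]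

-- A's tail loop appends one set bit per element.
theorem pfTail (l : List Int) (fp : Int) :
    l.foldl (fun f _ => f * 2 + 1) fp = fp * 2 ^ l.length + (2 ^ l.length - 1) := by
  induction l generalizing fp with
  | nil => simp
  | cons x l ih => simp only [List.foldl_cons, List.length_cons]; rw [ih]; ring

theorem pfPow_min (a b : Nat) : (2:Int) ^ (min a b) = min (2 ^ a) (2 ^ b) := by
  rcases le_total a b with h | h
  · simp [min_eq_left h, min_eq_left (pow_le_pow_right₀ (by norm_num : (1:Int) ≤ 2) h)]
  · simp [min_eq_right h, min_eq_right (pow_le_pow_right₀ (by norm_num : (1:Int) ≤ 2) h)]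

theorem pfEnum_ge {α : Type} (xs : List α) : ∀ (s : Int) (p : Int × α),
    p ∈ PySem.List.enumerate xs s → s ≤ p.1 := by
  induction xs with
  | nil => intro s p h; simp [PySem.List.enumerate] at h
  | cons x t ih =>
    intro s p h
    rw [show PySem.List.enumerate (x :: t) s = (s, x) :: PySem.List.enumerate t (s + 1) from rfl] at h
    rcases List.mem_cons.mp h with h | h
    · subst h; exact le_refl s
    · have := ih (s + 1) p h; omega

-- every value stored by the first pass lies in [0, 2**bits_per_letter - 1]
theorem pfPosition_bound (word : String) (most_common : List String) (bpl : Int) (k : String) (v : Int)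
    (h : (pfPosition word most_common bpl).get? k = some v) : 0 ≤ v ∧ v ≤ 2 ^ bpl.toNat - 1 := by
  have main : ∀ (l : List (Int × Char)) (d : PySem.Dict String Int),
      (∀ p ∈ l, 0 ≤ p.1) →
      (∀ k v, d.get? k = some v → 0 ≤ v ∧ v ≤ 2 ^ bpl.toNat - 1) →
      ∀ k v, (l.foldl (fun position pl =>
          let letter := String.ofList [pl.2]
          if !position.contains letter && most_common.contains letter then
            position.insert letter (min pl.1 (2 ^ bpl.toNat - 1))
          else position) d).get? k = some v → 0 ≤ v ∧ v ≤ 2 ^ bpl.toNat - 1 := by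
    intro l
    induction l with
    | nil => intro d _ hd k v h; exact hd k v h
    | cons p t ih =>
      intro d hmem hd k v h
      rw [List.foldl_cons] at h
      refine ih _ (fun q hq => hmem q (List.mem_cons_of_mem _ hq)) ?_ k v h
      intro k' v' h'
      by_cases hc : (!d.contains (String.ofList [p.2]) && most_common.contains (String.ofList [p.2])) = true
      · simp only [hc, if_true] at h'
        rw [PySem.Dict.get?_insert] at h'
        split at h'
        · cases h'
          have hp := hmem p List.mem_cons_self
          constructor
          · have h2 : (0:Int) < 2 ^ bpl.toNat := pow_pos (by norm_num) _
            exact le_min hp (by omega)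
          · exact min_le_right _ _
        · exact hd k' v' h'
      · simp only [hc, if_neg, Bool.false_eq_true, not_false_iff] at h'
        exact hd k' v' h'
  refine main _ PySem.Dict.empty ?_ ?_ k v h
  · intro p hp; exact pfEnum_ge word.toList 0 p hp
  · intro k v h'; rw [PySem.Dict.get?_empty] at h'; cases h'

-- the two main loops, in lockstep
theorem pfLoop (pos : PySem.Dict String Int) (bpl : Int)
    (hpos : ∀ k v, pos.get? k = some v → 0 ≤ v ∧ v ≤ 2 ^ bpl.toNat - 1) :
    ∀ (mc : List String) (fields : List (List Char)) (nb : Int) (broke : Bool), 0 ≤ nb →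
      mc.foldl
        (fun st letter =>
          if st.2.2 then st
          else if st.2.1 ≠ 0 then
            ((match pos.get? letter with
              | some v => st.1 <<< (min bpl st.2.1).toNat + min v (2 ^ st.2.1.toNat - 1)
              | none   => st.1 <<< (min bpl st.2.1).toNat
                  + min ((2 : Int) ^ bpl.toNat - 1) (2 ^ st.2.1.toNat - 1)),
             st.2.1 - min bpl st.2.1, false)
          else (st.1, st.2.1, true))
        (pfVal fields.flatten, nb, broke) =
      ((fun sB => (pfVal sB.1.flatten, sB.2.1, sB.2.2))
        (mc.foldl
          (fun st letter =>
            if st.2.2 then st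
            else if st.2.1 ≤ 0 then (st.1, st.2.1, true)
            else
              (st.1 ++ [pfField (match pos.get? letter with
                  | some v => min v (2 ^ st.2.1.toNat - 1)
                  | none   => min ((2 : Int) ^ bpl.toNat - 1) (2 ^ st.2.1.toNat - 1))
                (min bpl st.2.1)], st.2.1 - min bpl st.2.1, false))
          (fields, nb, broke))) ∧
      0 ≤ (mc.foldl
          (fun st letter =>
            if st.2.2 then st
            else if st.2.1 ≤ 0 then (st.1, st.2.1, true)
            else
              (st.1 ++ [pfField (match pos.get? letter with
                  | some v => min v (2 ^ st.2.1.toNat - 1)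
                  | none   => min ((2 : Int) ^ bpl.toNat - 1) (2 ^ st.2.1.toNat - 1))
                (min bpl st.2.1)], st.2.1 - min bpl st.2.1, false))
          (fields, nb, broke)).2.1 := by
  intro mc
  induction mc with
  | nil => intro fields nb broke hnb; exact ⟨rfl, hnb⟩
  | cons letter rest ih =>
    intro fields nb broke hnb
    simp only [List.foldl_cons]
    cases broke with
    | true => simpa using ih fields nb true hnb
    | false =>
      by_cases h0 : nb = 0
      · subst h0
        simpa using ih fields 0 true le_rfl
      · have hpos' : 0 < nb := lt_of_le_of_ne hnb (Ne.symm h0)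
        have hble : ¬ nb ≤ 0 := not_le_of_gt hpos'
        have hwle : min bpl nb ≤ nb := min_le_right _ _
        have hnb' : 0 ≤ nb - min bpl nb := by omega
        have hcap0 : (0:Int) ≤ 2 ^ nb.toNat - 1 := by
          have := pow_pos (by norm_num : (0:Int) < 2) nb.toNat; omega
        have hmin : (min bpl nb).toNat = min bpl.toNat nb.toNat := by omega
        have hcapmin : (2:Int) ^ (min bpl nb).toNat - 1
            = min ((2:Int) ^ bpl.toNat - 1) (2 ^ nb.toNat - 1) := by
          rw [hmin, pfPow_min]; omega
        have hbpl0 : (0:Int) < 2 ^ bpl.toNat := pow_pos (by norm_num) _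
        rcases hg : pos.get? letter with _ | v
        · -- letter not in position
          have hv0 : 0 ≤ min ((2:Int) ^ bpl.toNat - 1) (2 ^ nb.toNat - 1) := le_min (by omega) hcap0
          have hvlt : min ((2:Int) ^ bpl.toNat - 1) (2 ^ nb.toNat - 1) < 2 ^ (min bpl nb).toNat := by
            have h1 : min ((2:Int) ^ bpl.toNat - 1) (2 ^ nb.toNat - 1) ≤ 2 ^ (min bpl nb).toNat - 1 := by
              rw [hcapmin]
            omega
          have hkey : pfVal ((fields ++
                [pfField (min ((2:Int) ^ bpl.toNat - 1) (2 ^ nb.toNat - 1)) (min bpl nb)]).flatten)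
              = pfVal fields.flatten <<< (min bpl nb).toNat
                + min ((2:Int) ^ bpl.toNat - 1) (2 ^ nb.toNat - 1) := by
            rw [Int.shiftLeft_eq, List.flatten_append,
              show ([pfField (min ((2:Int) ^ bpl.toNat - 1) (2 ^ nb.toNat - 1)) (min bpl nb)] : List (List Char)).flatten
                = pfField (min ((2:Int) ^ bpl.toNat - 1) (2 ^ nb.toNat - 1)) (min bpl nb) by simp,
              pfVal_append, pfField_length, pfVal_pfField _ _ hv0 hvlt]
          have hih := ih (fields ++
              [pfField (min ((2:Int) ^ bpl.toNat - 1) (2 ^ nb.toNat - 1)) (min bpl nb)])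
            (nb - min bpl nb) false hnb'
          simp only [if_neg hble, if_pos h0, Bool.false_eq_true, if_false]
          rw [← hkey]
          exact hih
        · -- letter in position
          have hb := hpos _ v hg
          have hv0 : 0 ≤ min v ((2:Int) ^ nb.toNat - 1) := le_min hb.1 hcap0
          have hvlt : min v ((2:Int) ^ nb.toNat - 1) < 2 ^ (min bpl nb).toNat := by
            have h1 : min v ((2:Int) ^ nb.toNat - 1) ≤ 2 ^ (min bpl nb).toNat - 1 := by
              rw [hcapmin]
              exact le_min (le_trans (min_le_left _ _) hb.2) (min_le_right _ _)
            omega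
          have hkey : pfVal ((fields ++
                [pfField (min v ((2:Int) ^ nb.toNat - 1)) (min bpl nb)]).flatten)
              = pfVal fields.flatten <<< (min bpl nb).toNat + min v ((2:Int) ^ nb.toNat - 1) := by
            rw [Int.shiftLeft_eq, List.flatten_append,
              show ([pfField (min v ((2:Int) ^ nb.toNat - 1)) (min bpl nb)] : List (List Char)).flatten
                = pfField (min v ((2:Int) ^ nb.toNat - 1)) (min bpl nb) by simp,
              pfVal_append, pfField_length, pfVal_pfField _ _ hv0 hvlt]
          have hih := ih (fields ++ [pfField (min v ((2:Int) ^ nb.toNat - 1)) (min bpl nb)])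
            (nb - min bpl nb) false hnb'
          simp only [if_neg hble, if_pos h0, Bool.false_eq_true, if_false]
          rw [← hkey]
          exact hih

-- ===== VERDICT (by name: the statement is the Claim_ definition above) =====
theorem position_fingerprint_spec : Claim_equal_position_fingerprint := by
  intro word n_bits mc bpl hdom hpre
  unfold Spec_position_fingerprint
  simp only [position_fingerprint, position_fingerprint_alt]
  rw [show ∀ cs : List Char,
      cs.foldl (fun fingerprint bit => fingerprint * 2 + (if bit == '1' then 1 else 0)) 0 = pfVal cs
    from fun _ => rfl]
  by_cases hnb : 0 ≤ n_bits
  · have h1 := (pfLoop (pfPosition word mc bpl) bpl (pfPosition_bound word mc bpl)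
      mc [] n_bits false hnb).1
    rw [show pfVal (List.flatten ([] : List (List Char))) = (0:Int) from rfl] at h1
    rw [h1]
    rw [pfTail, PySem.List.length_pyRange_one]
    rw [List.flatten_append,
      show ∀ cs : List Char, ([cs] : List (List Char)).flatten = cs from fun _ => by simp,
      pfVal_append, List.length_replicate, pfVal_ones, sub_zero]
  · have hmc : mc = [] := by
      rcases hpre with h | h | h
      · exact h
      · exact absurd (le_of_eq h.symm) hnb
      · exact absurd (le_of_lt h.1) hnb
    subst hmc
    simp only [List.foldl_nil]
    rw [pfTail, PySem.List.length_pyRange_one]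
    have h1 : (n_bits - 0).toNat = 0 := by omega
    have h2 : n_bits.toNat = 0 := by omega
    rw [h1, h2]
    simp [pfVal]
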